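-- pv_equiv track=rewrite | github.com/nk-knvlv/courses_stuff | src/tasks_5.py | get_friendly_nums_in_interval
-- ===== SOURCE A (Python) =====
-- def get_denominators_without_num(num):
--     return [x for x in range(1, num) if num % x == 0]
--
-- def get_friendly_nums_in_interval(start, end):
--     friendly_nums = []
--     for num in range(start, end + 1):
--         num_denominators = get_denominators_without_num(num)
--         possible_friendly_num = sum(num_denominators)
--         if possible_friendly_num in range(start, end // 2 + 1):
--             pos_friend_denominators = get_denominators_without_num(possible_friendly_num)
--             if sum(pos_friend_denominators) == num:
--                 friendly_nums.append([num])
--     return friendly_nums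
-- ===== SOURCE B (Python) =====
-- def _proper_divisor_sum(n):
--     # sum of proper divisors trial division up to sqrt(n), pairing d with n // d; 0 for n <= 1
--     if n <= 1:
--         return 0
--     total = 1
--     d = 2
--     while d * d <= n:
--         if n % d == 0:
--             total += d
--             q = n // d
--             if q != d:
--                 total += q
--         d += 1
--     return total
--
-- def get_friendly_nums_in_interval(start, end):
--     half = end // 2
--     friendly_nums = []
--     for num in range(start, end + 1):
--         s = _proper_divisor_sum(num)
--         if start <= s <= half and _proper_divisor_sum(s) == num:
--             friendly_nums.append([num])
--     return friendly_nums
-- ===== Notes on version B (the rewrite author's own statement) =====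
-- stated objective: alternative
-- what changed: B computes each proper-divisor sum by trial division up to sqrt(n), pairing each divisor d with its cofactor n//d, instead of A's full scan of range(1, n) for every number in the interval.
import Mathlib
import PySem

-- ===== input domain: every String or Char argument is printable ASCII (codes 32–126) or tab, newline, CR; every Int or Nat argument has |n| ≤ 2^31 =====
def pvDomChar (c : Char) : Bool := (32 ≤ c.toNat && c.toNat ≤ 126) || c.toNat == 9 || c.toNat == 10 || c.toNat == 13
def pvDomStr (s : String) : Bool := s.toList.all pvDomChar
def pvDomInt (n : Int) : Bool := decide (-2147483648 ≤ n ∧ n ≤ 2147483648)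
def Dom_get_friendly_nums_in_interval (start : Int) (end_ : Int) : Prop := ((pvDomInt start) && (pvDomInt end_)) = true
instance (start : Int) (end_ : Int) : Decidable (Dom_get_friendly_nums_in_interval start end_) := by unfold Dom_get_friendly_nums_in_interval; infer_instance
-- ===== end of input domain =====

-- B computes each proper-divisor sum by trial division up to sqrt(n), pairing each divisor
-- d with its cofactor n // d, instead of A's full scan of range(1, n) (objective: alternative).

-- ===== PORT A =====
def get_denominators_without_num (num : Int) : List Int :=
  (PySem.List.pyRange 1 num 1).filter (fun x => PySem.Int.mod num x == 0)

def get_friendly_nums_in_interval (start : Int) (end_ : Int) : List (List Int) :=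
  (PySem.List.pyRange start (end_ + 1) 1).foldl (fun friendly_nums num =>
    let num_denominators := get_denominators_without_num num
    let possible_friendly_num := num_denominators.sum
    if start ≤ possible_friendly_num ∧
        possible_friendly_num < PySem.Int.floordiv end_ 2 + 1 then
      let pos_friend_denominators := get_denominators_without_num possible_friendly_num
      if pos_friend_denominators.sum == num then friendly_nums ++ [[num]] else friendly_nums
    else friendly_nums) []

-- ===== PORT B =====
-- the 'while d * d <= n' loop of Source B's _proper_divisor_sum
def pvSpdAux (n : Int) (d : Int) (total : Int) : Int :=
  if d * d ≤ n then
    pvSpdAux n (d + 1)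
      (if PySem.Int.mod n d == 0 then
        (let q := PySem.Int.floordiv n d
         if q ≠ d then total + d + q else total + d)
      else total)
  else total
termination_by (n + 1 - d).toNat
decreasing_by
  have hd : d ≤ d * d := by nlinarith [sq_nonneg d, sq_nonneg (d - 1)]
  omega

def pvProperDivisorSum (n : Int) : Int :=
  if n ≤ 1 then 0 else pvSpdAux n 2 1

def get_friendly_nums_in_interval_alt (start : Int) (end_ : Int) : List (List Int) :=
  let half := PySem.Int.floordiv end_ 2
  (PySem.List.pyRange start (end_ + 1) 1).foldl (fun friendly_nums num =>
    let s := pvProperDivisorSum num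
    if (start ≤ s ∧ s ≤ half) ∧ pvProperDivisorSum s == num then
      friendly_nums ++ [[num]]
    else friendly_nums) []

-- ===== PRECONDITION & SPEC =====
def Spec_get_friendly_nums_in_interval (start : Int) (end_ : Int) (out : List (List Int)) : Prop := out = get_friendly_nums_in_interval_alt start end_
instance (start : Int) (end_ : Int) (out : List (List Int)) : Decidable (Spec_get_friendly_nums_in_interval start end_ out) := by unfold Spec_get_friendly_nums_in_interval; infer_instance

-- ===== CLAIM (what is proved, stated in full; the proofs are below) =====
def Claim_equal_get_friendly_nums_in_interval : Prop := ∀ (start : Int) (end_ : Int), Dom_get_friendly_nums_in_interval start end_ → Spec_get_friendly_nums_in_interval start end_ (get_friendly_nums_in_interval start end_)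

-- ===== LEMMAS AND PROOFS =====

-- A's divisor-list sum, restated as a Nat-valued Finset sum
lemma sumA_eq (n k : ℕ) :
    ((PySem.List.pyRange 1 (k : Int) 1).filter (fun x => PySem.Int.mod (n : Int) x == 0)).sum
      = ((∑ x ∈ Finset.Ico 1 k, if x ∣ n then x else 0 : ℕ) : Int) := by
  induction k with
  | zero => simp [PySem.List.pyRange_one_eq_nil (by norm_num : (0 : Int) ≤ 1)]
  | succ k ih =>
    rcases Nat.eq_zero_or_pos k with hk | hk
    · subst hk
      simp [PySem.List.pyRange_one_eq_nil (by norm_num : ((1 : ℕ) : Int) ≤ 1)]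
    · have hcast : ((k + 1 : ℕ) : Int) = (k : Int) + 1 := by push_cast; ring
      rw [hcast, PySem.List.pyRange_one_succ_right (by exact_mod_cast hk : (1 : Int) ≤ (k : Int)),
        List.filter_append, List.sum_append, ih,
        Finset.sum_Ico_succ_top (by omega : 1 ≤ k)]
      have hmod : PySem.Int.mod (n : Int) (k : Int) = ((n % k : ℕ) : Int) :=
        PySem.Int.mod_natCast n k
      by_cases hd : k ∣ n
      · have h0 : n % k = 0 := Nat.mod_eq_zero_of_dvd hd
        have h2 : (((n % k : ℕ) : Int) == 0) = true := by
          rw [beq_iff_eq]; exact_mod_cast h0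
        rw [List.filter_singleton, hmod, h2]
        simp [hd]
      · have h0 : n % k ≠ 0 := fun h => hd (Nat.dvd_of_mod_eq_zero h)
        have h2 : (((n % k : ℕ) : Int) == 0) = false := by
          rw [beq_eq_false_iff_ne]; exact_mod_cast h0
        rw [List.filter_singleton, hmod, h2]
        simp [hd]

-- B's trial-division loop, characterised by the Finset sum it accumulates
lemma pvSpdAux_spec (b m d : ℕ) (hb : m + 1 - d = b) (hd : 1 ≤ d) (total : Int) :
    pvSpdAux (m : Int) (d : Int) total
      = total + ((∑ k ∈ (Finset.Ico d (m + 1)).filter (fun k => k * k ≤ m ∧ k ∣ m),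
          (k + if m / k ≠ k then m / k else 0) : ℕ) : Int) := by
  induction b generalizing d total with
  | zero =>
    have hdd : d ≤ d * d := Nat.le_mul_of_pos_left d hd
    have hcond : ¬ ((d : Int) * d ≤ (m : Int)) := by
      have : ¬ (d * d ≤ m) := by omega
      exact_mod_cast this
    rw [pvSpdAux, if_neg hcond]
    rw [Finset.Ico_eq_empty (by omega : ¬ d < m + 1)]
    simp
  | succ b ih =>
    by_cases hc : d * d ≤ m
    · have hcond : ((d : Int) * d ≤ (m : Int)) := by exact_mod_cast hc
      have hdm : d ≤ m := le_trans (Nat.le_mul_of_pos_left d hd) hc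
      rw [pvSpdAux, if_pos hcond]
      rw [show ((d : Int) + 1) = ((d + 1 : ℕ) : Int) by push_cast; ring]
      have hmod : PySem.Int.mod (m : Int) (d : Int) = ((m % d : ℕ) : Int) :=
        PySem.Int.mod_natCast m d
      have hfd : PySem.Int.floordiv (m : Int) (d : Int) = ((m / d : ℕ) : Int) :=
        PySem.Int.floordiv_natCast m d
      have hIco : Finset.Ico d (m + 1) = insert d (Finset.Ico (d + 1) (m + 1)) :=
        (Finset.insert_Ico_add_one_left_eq_Ico (by omega)).symm
      have hnotmem : d ∉ (Finset.Ico (d + 1) (m + 1)).filter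
          (fun k => k * k ≤ m ∧ k ∣ m) := by simp
      by_cases hdvd : d ∣ m
      · have h0 : m % d = 0 := Nat.mod_eq_zero_of_dvd hdvd
        have h2 : (((m % d : ℕ) : Int) == 0) = true := by
          rw [beq_iff_eq]; exact_mod_cast h0
        rw [hmod, h2, if_pos rfl, hfd, ih (d + 1) (by omega) (by omega)]
        rw [hIco, Finset.filter_insert,
          if_pos (show d * d ≤ m ∧ d ∣ m from ⟨hc, hdvd⟩), Finset.sum_insert hnotmem]
        by_cases hq : m / d = d
        · rw [if_neg (show ¬ (((m / d : ℕ) : Int) ≠ ((d : ℕ) : Int)) by simp [hq]),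
            if_neg (show ¬ (m / d ≠ d) by simp [hq])]
          push_cast [hq]
          ring
        · rw [if_pos (show (((m / d : ℕ) : Int) ≠ ((d : ℕ) : Int)) by exact_mod_cast hq),
            if_pos hq]
          push_cast
          ring
      · have h0 : m % d ≠ 0 := fun h => hdvd (Nat.dvd_of_mod_eq_zero h)
        have h2 : (((m % d : ℕ) : Int) == 0) = false := by
          rw [beq_eq_false_iff_ne]; exact_mod_cast h0
        rw [hmod, h2]
        simp only [Bool.false_eq_true, if_false]
        rw [ih (d + 1) (by omega) (by omega)]
        rw [hIco, Finset.filter_insert, if_neg (by tauto), ]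
    · have hcond : ¬ ((d : Int) * d ≤ (m : Int)) := by exact_mod_cast hc
      rw [pvSpdAux, if_neg hcond]
      have hempty : (Finset.Ico d (m + 1)).filter (fun k => k * k ≤ m ∧ k ∣ m) = ∅ := by
        rw [Finset.filter_eq_empty_iff]
        intro k hk
        have hdk : d ≤ k := (Finset.mem_Ico.mp hk).1
        have : d * d ≤ k * k := Nat.mul_le_mul hdk hdk
        omega
      rw [hempty]
      simp

-- the pairing argument: full proper-divisor sum = 1 + sqrt-bounded paired sum
lemma pairing (m : ℕ) (hm : 2 ≤ m) :
    (∑ x ∈ Finset.Ico 1 m, if x ∣ m then x else 0)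
      = 1 + ∑ k ∈ (Finset.Ico 2 (m + 1)).filter (fun k => k * k ≤ m ∧ k ∣ m),
          (k + if m / k ≠ k then m / k else 0) := by
  have hm0 : m ≠ 0 := by omega
  rw [← Finset.sum_filter]
  have hsplit : (Finset.Ico 1 m).filter (· ∣ m)
      = insert 1 ((Finset.Ico 2 m).filter (· ∣ m)) := by
    ext x
    simp only [Finset.mem_filter, Finset.mem_Ico, Finset.mem_insert]
    constructor
    · rintro ⟨⟨hx1, hx2⟩, hx3⟩
      by_cases hx : x = 1
      · exact Or.inl hx
      · exact Or.inr ⟨⟨by omega, hx2⟩, hx3⟩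
    · rintro (rfl | ⟨⟨hx1, hx2⟩, hx3⟩)
      · exact ⟨⟨le_refl 1, by omega⟩, one_dvd m⟩
      · exact ⟨⟨by omega, hx2⟩, hx3⟩
  rw [hsplit, Finset.sum_insert (by simp)]
  congr 1
  rw [Finset.sum_add_distrib, ← Finset.sum_filter_add_sum_filter_not
    ((Finset.Ico 2 m).filter (· ∣ m)) (fun k => k * k ≤ m) (fun x => x)]
  have e1 : ((Finset.Ico 2 m).filter (· ∣ m)).filter (fun k => k * k ≤ m)
      = (Finset.Ico 2 (m + 1)).filter (fun k => k * k ≤ m ∧ k ∣ m) := by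
    ext k
    simp only [Finset.mem_filter, Finset.mem_Ico]
    constructor
    · rintro ⟨⟨⟨hk1, hk2⟩, hk3⟩, hk4⟩
      exact ⟨⟨hk1, by omega⟩, hk4, hk3⟩
    · rintro ⟨⟨hk1, hk2⟩, hk4, hk3⟩
      have hkm : k ≠ m := by
        rintro rfl
        nlinarith
      exact ⟨⟨⟨hk1, by omega⟩, hk3⟩, hk4⟩
  have e2 : ∑ k ∈ (Finset.Ico 2 (m + 1)).filter (fun k => k * k ≤ m ∧ k ∣ m),
        (if m / k ≠ k then m / k else 0)
      = ∑ k ∈ (Finset.Ico 2 (m + 1)).filter (fun k => k * k < m ∧ k ∣ m), m / k := by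
    rw [← Finset.sum_filter]
    congr 1
    ext k
    simp only [Finset.filter_filter, Finset.mem_filter, Finset.mem_Ico, and_assoc]
    constructor
    · rintro ⟨hk1, hk2, hk3, hk4, hk5⟩
      obtain ⟨c, hc⟩ := hk4
      have hdc : m / k = c := by rw [hc]; exact Nat.mul_div_cancel_left c (by omega)
      refine ⟨hk1, hk2, ?_, c, hc⟩
      rcases Nat.lt_or_ge (k * k) m with h | h
      · exact h
      · have : k * k = m := by omega
        have : m / k = k := by rw [← this]; exact Nat.mul_div_cancel_left k (by omega)
        exact absurd this hk5
    · rintro ⟨hk1, hk2, hk3, hk4⟩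
      obtain ⟨c, hc⟩ := hk4
      have hdc : m / k = c := by rw [hc]; exact Nat.mul_div_cancel_left c (by omega)
      have hck : k < c := by nlinarith
      exact ⟨hk1, hk2, by omega, ⟨c, hc⟩, by omega⟩
  have e3 : ∑ k ∈ ((Finset.Ico 2 m).filter (· ∣ m)).filter (fun k => ¬ k * k ≤ m), k
      = ∑ k ∈ (Finset.Ico 2 (m + 1)).filter (fun k => k * k < m ∧ k ∣ m), m / k := by
    refine Finset.sum_nbij' (fun x => m / x) (fun k => m / k) ?_ ?_ ?_ ?_ ?_
    · intro x hx
      simp only [Finset.mem_filter, Finset.mem_Ico] at hx ⊢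
      obtain ⟨⟨⟨hx1, hx2⟩, hx3⟩, hx4⟩ := hx
      obtain ⟨c, hc⟩ := hx3
      have hdc : m / x = c := by rw [hc]; exact Nat.mul_div_cancel_left c (by omega)
      have hc2 : 2 ≤ c := by
        rcases Nat.lt_or_ge c 2 with h | h
        · interval_cases c <;> simp_all
        · exact h
      have hcx : c < x := by nlinarith
      have hcc : c * c < m := by nlinarith
      rw [hdc]
      exact ⟨⟨by omega, by omega⟩, hcc, ⟨x, hc.trans (Nat.mul_comm x c)⟩⟩
    · intro k hk
      simp only [Finset.mem_filter, Finset.mem_Ico] at hk ⊢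
      obtain ⟨⟨hk1, hk2⟩, hk3, hk4⟩ := hk
      obtain ⟨c, hc⟩ := hk4
      have hdc : m / k = c := by rw [hc]; exact Nat.mul_div_cancel_left c (by omega)
      have hkc : k < c := by nlinarith
      have hcm : c < m := by nlinarith
      rw [hdc]
      exact ⟨⟨⟨by omega, hcm⟩, ⟨k, hc.trans (Nat.mul_comm k c)⟩⟩, by nlinarith⟩
    · intro x hx
      simp only [Finset.mem_filter, Finset.mem_Ico] at hx
      exact Nat.div_div_self hx.1.2 hm0
    · intro k hk
      simp only [Finset.mem_filter, Finset.mem_Ico] at hk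
      exact Nat.div_div_self hk.2.2 hm0
    · intro x hx
      simp only [Finset.mem_filter, Finset.mem_Ico] at hx
      exact (Nat.div_div_self hx.1.2 hm0).symm
  rw [e1, e2, e3]

lemma dsum_eq (n : Int) :
    (get_denominators_without_num n).sum = pvProperDivisorSum n := by
  by_cases hn : n ≤ 1
  · simp [get_denominators_without_num, pvProperDivisorSum,
      PySem.List.pyRange_one_eq_nil hn, hn]
  · push Not at hn
    obtain ⟨m, rfl⟩ : ∃ m : ℕ, (m : Int) = n := ⟨n.toNat, by omega⟩
    have hm : 2 ≤ m := by omega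
    unfold get_denominators_without_num pvProperDivisorSum
    rw [if_neg (by omega), sumA_eq m m, pairing m hm]
    have h2 : ((2 : ℕ) : Int) = 2 := by norm_num
    rw [← h2, pvSpdAux_spec (m + 1 - 2) m 2 rfl (by omega) 1]
    push_cast
    ring

-- ===== VERDICT (by name: the statement is the Claim_ definition above) =====
theorem get_friendly_nums_in_interval_spec : Claim_equal_get_friendly_nums_in_interval := by
  intro start end_ _
  unfold Spec_get_friendly_nums_in_interval get_friendly_nums_in_interval get_friendly_nums_in_interval_alt
  have hfd : PySem.Int.floordiv end_ 2 = end_ / 2 :=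
    PySem.Int.floordiv_eq_ediv_of_pos (by norm_num)
  simp only [dsum_eq, hfd, beq_iff_eq]
  congr 1
  funext acc num
  by_cases h1 : start ≤ pvProperDivisorSum num ∧ pvProperDivisorSum num ≤ end_ / 2
  · have h1' : start ≤ pvProperDivisorSum num ∧
        pvProperDivisorSum num < end_ / 2 + 1 := ⟨h1.1, by omega⟩
    by_cases h2 : pvProperDivisorSum (pvProperDivisorSum num) = num
    · simp [h1, h1', h2]
    · simp [h1, h1', h2]
  · have h1' : ¬ (start ≤ pvProperDivisorSum num ∧
        pvProperDivisorSum num < end_ / 2 + 1) := by omega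
    simp [h1]
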